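-- pv_equiv track=rewrite | github.com/cybersecctf/blog | 2025/picoctf/endianness/writeup1.py | solve
-- ===== SOURCE A (Python) =====
-- def solve(operation, word, endian_type):
--     """
--     Encodes or decodes a word based on the specified endian type.
--
--     Parameters:
--         operation (str): "encode" or "decode".
--         word (str): The word to encode or the encoded hexadecimal string to decode.
--         endian_type (str): "little" or "big".
--
--     Returns:
--         str: The encoded or decoded result.
--     """
--     if operation == "encode":
--         if endian_type == "little":
--             # Encode to little-endian
--             return ''.join(f"{ord(word[i]):02X}" for i in range(len(word) - 1, -1, -1))
--         elif endian_type == "big":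
--             # Encode to big-endian
--             return ''.join(f"{ord(word[i]):02X}" for i in range(len(word)))
--         else:
--             raise ValueError("Invalid endian type. Use 'little' or 'big'.")
--     elif operation == "decode":
--         if endian_type == "little":
--             # Decode from little-endian
--             hex_pairs = [word[i:i+2] for i in range(0, len(word), 2)]
--             chars = [chr(int(hex_pair, 16)) for hex_pair in reversed(hex_pairs)]
--             return ''.join(chars)
--         elif endian_type == "big":
--             # Decode from big-endian
--             hex_pairs = [word[i:i+2] for i in range(0, len(word), 2)]
--             chars = [chr(int(hex_pair, 16)) for hex_pair in hex_pairs]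
--             return ''.join(chars)
--         else:
--             raise ValueError("Invalid endian type. Use 'little' or 'big'.")
--     else:
--         raise ValueError("Invalid operation. Use 'encode' or 'decode'.")
-- ===== SOURCE B (Python) =====
-- def solve(operation, word, endian_type):
--     if operation not in ("encode", "decode"):
--         raise ValueError("Invalid operation. Use 'encode' or 'decode'.")
--     if endian_type not in ("little", "big"):
--         raise ValueError("Invalid endian type. Use 'little' or 'big'.")
--     little = endian_type == "little"
--     out = ""
--     if operation == "encode":
--         for c in word:
--             piece = format(ord(c), "02X")
--             out = piece + out if little else out + piece
--     else:
--         for i in range(0, len(word), 2):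
--             piece = chr(int(word[i:i+2], 16))
--             out = piece + out if little else out + piece
--     return out
-- ===== Notes on version B (the rewrite author's own statement) =====
-- stated objective: alternative
-- what changed: B validates both arguments up front, then makes a single pass with one string accumulator, prepending each piece for little-endian and appending for big-endian, instead of A's four separate branch-specific list/range pipelines with joins and reversals.
import Mathlib
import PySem

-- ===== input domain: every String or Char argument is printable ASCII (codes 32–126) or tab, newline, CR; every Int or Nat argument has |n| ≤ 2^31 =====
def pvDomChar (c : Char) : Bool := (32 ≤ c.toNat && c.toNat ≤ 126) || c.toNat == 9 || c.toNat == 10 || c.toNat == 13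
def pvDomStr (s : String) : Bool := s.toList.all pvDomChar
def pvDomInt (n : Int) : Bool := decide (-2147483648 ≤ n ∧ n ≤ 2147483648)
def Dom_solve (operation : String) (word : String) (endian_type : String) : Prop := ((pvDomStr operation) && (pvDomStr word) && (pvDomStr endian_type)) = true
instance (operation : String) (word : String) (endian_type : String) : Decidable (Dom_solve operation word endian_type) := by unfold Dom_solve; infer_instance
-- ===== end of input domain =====

-- B validates both arguments up front, then builds the result in ONE pass with a single string
-- accumulator (prepend for little-endian, append for big-endian), instead of A's four separate
-- branch-specific list/range pipelines; objective: alternative decomposition.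

-- ===== PORT A =====
-- f"{n:02X}" — exact for 0 ≤ n < 256 (here n = ord of a Dom character, ≤ 126)
def hexDigitU (d : Nat) : Char := if d < 10 then Char.ofNat (48 + d) else Char.ofNat (55 + d)
def hexByte (n : Nat) : List Char := [hexDigitU (n / 16), hexDigitU (n % 16)]
-- chr(int(p, 16)) — Pre_ guarantees the parse succeeds with a value in 0..255 (≤ 2 hex digits)
def decPair (p : List Char) : Char := Char.ofNat ((PySem.Int.ofCharsBase? p 16).getD 0).toNat

def solve (operation : String) (word : String) (endian_type : String) : String :=
  let w := word.toList
  if operation = "encode" then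
    if endian_type = "little" then
      String.mk ((PySem.List.pyRange ((w.length : Int) - 1) (-1) (-1)).map
        (fun i => hexByte (PySem.List.pyGetD w i ' ').toNat)).flatten
    else if endian_type = "big" then
      String.mk ((PySem.List.pyRange 0 (w.length : Int) 1).map
        (fun i => hexByte (PySem.List.pyGetD w i ' ').toNat)).flatten
    else ""  -- raise ValueError (excluded by Pre_)
  else if operation = "decode" then
    if endian_type = "little" then
      let hex_pairs := (PySem.List.pyRange 0 (w.length : Int) 2).map
        (fun i => PySem.List.slice w (some i) (some (i + 2)))
      let chars := hex_pairs.reverse.map decPair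
      String.mk chars
    else if endian_type = "big" then
      let hex_pairs := (PySem.List.pyRange 0 (w.length : Int) 2).map
        (fun i => PySem.List.slice w (some i) (some (i + 2)))
      let chars := hex_pairs.map decPair
      String.mk chars
    else ""  -- raise ValueError (excluded by Pre_)
  else ""  -- raise ValueError (excluded by Pre_)

-- ===== PORT B =====
def solve_alt (operation : String) (word : String) (endian_type : String) : String :=
  if ¬(operation = "encode" ∨ operation = "decode") then ""  -- raise ValueError (excluded by Pre_)
  else if ¬(endian_type = "little" ∨ endian_type = "big") then ""  -- raise ValueError (excluded by Pre_)
  else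
    let little := endian_type = "little"
    let w := word.toList
    if operation = "encode" then
      String.mk (w.foldl (fun out c =>
        let piece := hexByte c.toNat
        if little then piece ++ out else out ++ piece) [])
    else
      String.mk ((PySem.List.pyRange 0 (w.length : Int) 2).foldl (fun out i =>
        let piece := [decPair (PySem.List.slice w (some i) (some (i + 2)))]
        if little then piece ++ out else out ++ piece) [])

-- ===== PRECONDITION & SPEC =====
-- Pre_ excludes exactly the inputs on which the Python A raises ValueError: an operation other
-- than "encode"/"decode", an endian_type other than "little"/"big", and decode inputs where some
-- 2-char chunk is not a valid non-negative base-16 literal (int() or chr() raises).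
def Pre_solve (operation : String) (word : String) (endian_type : String) : Prop :=
  (operation = "encode" ∨ operation = "decode") ∧
  (endian_type = "little" ∨ endian_type = "big") ∧
  (operation = "decode" →
    ∀ i ∈ PySem.List.pyRange 0 (word.toList.length : Int) 2,
      0 ≤ (PySem.Int.ofCharsBase? (PySem.List.slice word.toList (some i) (some (i + 2))) 16).getD (-1))
instance (operation : String) (word : String) (endian_type : String) : Decidable (Pre_solve operation word endian_type) := by unfold Pre_solve; infer_instance
def pvWitness_solve : String × String × String := ("decode", "4142", "little")
def Spec_solve (operation : String) (word : String) (endian_type : String) (out : String) : Prop := out = solve_alt operation word endian_type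
instance (operation : String) (word : String) (endian_type : String) (out : String) : Decidable (Spec_solve operation word endian_type out) := by unfold Spec_solve; infer_instance

-- ===== CLAIM (what is proved, stated in full; the proofs are below) =====
def Claim_equal_solve : Prop := ∀ (operation : String) (word : String) (endian_type : String), Dom_solve operation word endian_type → Pre_solve operation word endian_type → Spec_solve operation word endian_type (solve operation word endian_type)

-- ===== LEMMAS AND PROOFS =====

-- A's index loop over range(len(w)) applied through f is the map over w itself.
theorem map_f_pyGetD_range {α β : Type} (w : List α) (f : α → β) (d : α) :
    (PySem.List.pyRange 0 (w.length : Int) 1).map (fun i => f (PySem.List.pyGetD w i d))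
      = w.map f := by
  have h : (PySem.List.pyRange 0 ((w.length : Int)) 1).map (fun i => PySem.List.pyGetD w i d) = w := by
    have := PySem.List.map_pyGetD_pyRange_zero w d
    simpa [PySem.List.len] using this
  conv_lhs => rw [show (fun i => f (PySem.List.pyGetD w i d))
      = f ∘ (fun i => PySem.List.pyGetD w i d) from rfl, ← List.map_map, h]

-- A's countdown range(len(w)-1, -1, -1) is the reverse of range(len(w)).
theorem pyRange_countdown (n : Nat) :
    PySem.List.pyRange ((n : Int) - 1) (-1) (-1) = (PySem.List.pyRange 0 (n : Int) 1).reverse := by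
  have h := PySem.List.pyRange_neg_one_eq_reverse ((n : Int) - 1) (-1)
  simpa using h

-- B's append-accumulator pass produces the concatenation of the pieces in order.
theorem foldl_append_pieces {α β : Type} (xs : List α) (g : α → List β) (acc : List β) :
    xs.foldl (fun out x => out ++ g x) acc = acc ++ (xs.map g).flatten := by
  induction xs generalizing acc with
  | nil => simp
  | cons x xs ih => simp [ih]

-- B's prepend-accumulator pass produces the concatenation of the pieces reversed.
theorem foldl_prepend_pieces {α β : Type} (xs : List α) (g : α → List β) (acc : List β) :
    xs.foldl (fun out x => g x ++ out) acc = (xs.map g).reverse.flatten ++ acc := by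
  induction xs generalizing acc with
  | nil => simp
  | cons x xs ih => simp [ih]

theorem flatten_reverse_map_singleton {α β : Type} (xs : List α) (g : α → β) :
    (xs.map (fun x => [g x])).reverse.flatten = (xs.map g).reverse := by
  induction xs with
  | nil => rfl
  | cons x xs ih => simp [ih]

theorem flatten_map_singleton {α β : Type} (xs : List α) (g : α → β) :
    (xs.map (fun x => [g x])).flatten = xs.map g := by
  induction xs with
  | nil => rfl
  | cons x xs ih => simp [ih]

-- ===== VERDICT (by name: the statement is the Claim_ definition above) =====
theorem solve_spec : Claim_equal_solve := by
  intro operation word endian_type _hdom hpre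
  obtain ⟨hop, hend, -⟩ := hpre
  unfold Spec_solve solve solve_alt
  rcases hop with hop | hop <;> rcases hend with hend | hend <;> subst hop <;> subst hend <;>
    simp only [reduceIte, String.reduceEq, or_true, true_or, not_true, ite_false, ite_true] <;>
    simp [foldl_append_pieces, foldl_prepend_pieces, pyRange_countdown,
      flatten_map_singleton, flatten_reverse_map_singleton,
      List.map_reverse, List.map_map, Function.comp_def] <;>
  first
  | rfl
  | (have key := map_f_pyGetD_range word.toList (fun c => hexByte c.toNat) ' '
     simp only [String.length_toList] at key
     rw [key])
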